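-- pv_equiv track=rewrite | github.com/PhaseRush/advent-of-code | 14/sol.py | shift_col
-- ===== SOURCE A (Python) =====
-- def shift_col(col):
--     cube_idxs = [-1] + [i for i, x in enumerate(col) if x == "#"] + [len(col)]
--     # cube_idxs = [-1] + locate_cubes(col) + [len(col)]
--
--     for idx in range(len(cube_idxs) - 1):
--         curr_start = cube_idxs[idx] + 1
--         curr_end = cube_idxs[idx + 1]
--
--         num_round = 0
--         for i in range(curr_start, curr_end):
--             num_round += col[i] == 'O'
--
--         for i in range(curr_start, curr_start + num_round):
--             col[i] = 'O'
--
--         for i in range(curr_start + num_round, curr_end):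
--             col[i] = '.'
--
--     return col
-- ===== SOURCE B (Python) =====
-- def shift_col(col):
--     # Single forward pass: accumulate each '#'-free segment's 'O' count and length,
--     # emit 'O'*count + '.'*(len-count) at each '#' and at the end; write back in place.
--     out = []
--     rounds = 0
--     seglen = 0
--     for x in col:
--         if x == '#':
--             out += ['O'] * rounds + ['.'] * (seglen - rounds) + ['#']
--             rounds = 0
--             seglen = 0
--         else:
--             rounds += x == 'O'
--             seglen += 1
--     out += ['O'] * rounds + ['.'] * (seglen - rounds)
--     col[:] = out
--     return col
-- ===== Notes on version B (the rewrite author's own statement) =====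
-- stated objective: simpler
-- what changed: A precomputes the list of '#' indices and then, for each cube-bounded segment, runs three separate index loops (count 'O's, write 'O's, write '.'s) mutating the list in place; B is a single forward pass that accumulates each '#'-free segment's 'O' count and length and emits the segment's output ('O'*count + '.'*(len-count)) at each '#' and at the end.
import Mathlib
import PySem

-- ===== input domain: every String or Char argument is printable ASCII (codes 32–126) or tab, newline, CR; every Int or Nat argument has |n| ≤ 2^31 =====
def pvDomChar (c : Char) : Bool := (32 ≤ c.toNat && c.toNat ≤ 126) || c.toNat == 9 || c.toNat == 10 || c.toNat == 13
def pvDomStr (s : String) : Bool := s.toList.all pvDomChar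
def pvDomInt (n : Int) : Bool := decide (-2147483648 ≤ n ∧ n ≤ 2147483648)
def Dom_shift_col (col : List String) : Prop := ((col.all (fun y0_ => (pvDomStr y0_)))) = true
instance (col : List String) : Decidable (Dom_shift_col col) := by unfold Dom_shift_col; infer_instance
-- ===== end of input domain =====

-- B replaces A's cube-index table plus three-loops-per-segment in-place rewriting with a single
-- forward pass that counts each '#'-free segment and emits its sorted content; A mutates its
-- argument in place (Python B mimics that via col[:] = out) — the theorem is about the return value.

-- ===== PORT A =====
def shift_col (col : List String) : List String :=
  let cube_idxs : List Int :=
    [-1] ++ ((PySem.List.enumerate col).filterMap (fun p => if p.2 = "#" then some p.1 else none))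
      ++ [(col.length : Int)]
  (PySem.List.pyRange 0 ((cube_idxs.length : Int) - 1) 1).foldl (fun c idx =>
    let curr_start := PySem.List.pyGetD cube_idxs idx 0 + 1
    let curr_end := PySem.List.pyGetD cube_idxs (idx + 1) 0
    let num_round := (PySem.List.pyRange curr_start curr_end 1).foldl
      (fun acc i => acc + (if PySem.List.pyGetD c i "" = "O" then 1 else 0)) (0 : Int)
    let c := (PySem.List.pyRange curr_start (curr_start + num_round) 1).foldl
      (fun c i => PySem.List.pySetD c i "O") c
    (PySem.List.pyRange (curr_start + num_round) curr_end 1).foldl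
      (fun c i => PySem.List.pySetD c i ".") c) col

-- ===== PORT B =====
-- emit one finished segment: rounds 'O's then (seglen - rounds) '.'s
def pvSegOut (rounds seglen : Int) : List String :=
  List.replicate rounds.toNat "O" ++ List.replicate (seglen - rounds).toNat "."

-- the single forward pass of Source B: accumulate (rounds, seglen) of the current segment
def pvAltGo : List String → Int → Int → List String
  | [], rounds, seglen => pvSegOut rounds seglen
  | x :: rest, rounds, seglen =>
    if x = "#" then pvSegOut rounds seglen ++ "#" :: pvAltGo rest 0 0
    else pvAltGo rest (rounds + (if x = "O" then 1 else 0)) (seglen + 1)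

def shift_col_alt (col : List String) : List String := pvAltGo col 0 0

-- ===== PRECONDITION & SPEC =====
def Spec_shift_col (col : List String) (out : List String) : Prop := out = shift_col_alt col
instance (col : List String) (out : List String) : Decidable (Spec_shift_col col out) := by unfold Spec_shift_col; infer_instance

-- ===== CLAIM (what is proved, stated in full; the proofs are below) =====
def Claim_equal_shift_col : Prop := ∀ (col : List String), Dom_shift_col col → Spec_shift_col col (shift_col col)

-- ===== LEMMAS AND PROOFS =====

-- proof-only helpers: hash indices, the cube list, adjacent pairs, and the closed form of one
-- iteration of A's outer loop
def pvHIdx : List String → Int → List Int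
  | [], _ => []
  | x :: xs, s => if x = "#" then s :: pvHIdx xs (s + 1) else pvHIdx xs (s + 1)

def pvCube (col : List String) : List Int :=
  [-1] ++ ((PySem.List.enumerate col).filterMap (fun p => if p.2 = "#" then some p.1 else none))
    ++ [(col.length : Int)]

def pvZipPairs (l : List Int) : List (Int × Int) := l.zip l.tail

def pvIterStep (s e : Nat) (c : List String) : List String :=
  let cnt := ((c.drop s).take (e - s)).countP (· == "O")
  c.take s ++ List.replicate cnt "O" ++ List.replicate (e - s - cnt) "." ++ c.drop e

def pvBody (a b : Int) (c : List String) : List String :=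
  let curr_start := a + 1
  let curr_end := b
  let num_round := (PySem.List.pyRange curr_start curr_end 1).foldl
    (fun acc i => acc + (if PySem.List.pyGetD c i "" = "O" then 1 else 0)) (0 : Int)
  let c := (PySem.List.pyRange curr_start (curr_start + num_round) 1).foldl
    (fun c i => PySem.List.pySetD c i "O") c
  (PySem.List.pyRange (curr_start + num_round) curr_end 1).foldl
    (fun c i => PySem.List.pySetD c i ".") c

lemma pv_hidx_enum (l : List String) (s : Int) :
    (PySem.List.enumerate l s).filterMap (fun p => if p.2 = "#" then some p.1 else none) = pvHIdx l s := by
  induction l generalizing s with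
  | nil => simp [pvHIdx, PySem.List.enumerate_nil]
  | cons x xs ih =>
    simp only [PySem.List.enumerate_cons, List.filterMap_cons, pvHIdx]
    split_ifs with h <;> simp [ih]

lemma pv_hidx_shift (l : List String) (s : Int) :
    pvHIdx l s = (pvHIdx l 0).map (s + ·) := by
  induction l generalizing s with
  | nil => simp [pvHIdx]
  | cons x xs ih =>
    simp only [pvHIdx]
    split_ifs with h
    · rw [ih (s+1), ih (0+1), List.map_cons, List.map_map]
      simp only [add_zero]
      congr 1
      apply List.map_congr_left; intro a _; simp [Function.comp]; ring
    · rw [ih (s+1), ih (0+1), List.map_map]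
      apply List.map_congr_left; intro a _; simp [Function.comp]; ring

lemma pv_hidx_append (pre l : List String) (s : Int) (h : pre.all (· ≠ "#")) :
    pvHIdx (pre ++ l) s = pvHIdx l (s + pre.length) := by
  induction pre generalizing s with
  | nil => simp
  | cons x xs ih =>
    simp only [List.all_cons, Bool.and_eq_true, decide_eq_true_eq] at h
    simp only [List.cons_append, pvHIdx, if_neg h.1]
    rw [ih _ h.2]
    congr 1
    simp
    ring

lemma pv_zip_pairs_map (l : List Int) (f : Int → Int) :
    pvZipPairs (l.map f) = (pvZipPairs l).map (fun q => (f q.1, f q.2)) := by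
  unfold pvZipPairs
  induction l with
  | nil => simp
  | cons a t ih =>
    cases t with
    | nil => simp
    | cons b t' => simp_all

lemma pv_hidx_nil_of_nohash (col : List String) (h : col.all (· ≠ "#")) (s : Int) :
    pvHIdx col s = [] := by
  induction col generalizing s with
  | nil => rfl
  | cons x xs ih =>
    simp only [List.all_cons, Bool.and_eq_true, decide_eq_true_eq] at h
    simp [pvHIdx, if_neg h.1, ih h.2]

lemma pv_pairs_base (col : List String) (h : col.all (· ≠ "#")) :
    pvZipPairs (pvCube col) = [((-1 : Int), (col.length : Int))] := by
  unfold pvCube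
  rw [pv_hidx_enum, pv_hidx_nil_of_nohash col h]
  rfl

lemma pv_zip_pairs_cons (a x : Int) (t : List Int) :
    pvZipPairs (a :: x :: t) = (a, x) :: pvZipPairs (x :: t) := rfl

lemma pv_pairs_step (pre rest : List String) (h : pre.all (· ≠ "#")) :
    pvZipPairs (pvCube (pre ++ "#" :: rest)) =
      ((-1 : Int), (pre.length : Int)) ::
        (pvZipPairs (pvCube rest)).map (fun q => (q.1 + (pre.length + 1), q.2 + (pre.length + 1))) := by
  have hc : pvCube (pre ++ "#" :: rest)
      = -1 :: (pvCube rest).map (fun x => x + ((pre.length : Int) + 1)) := by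
    unfold pvCube
    rw [pv_hidx_enum, pv_hidx_enum, pv_hidx_append pre _ 0 h]
    simp only [pvHIdx]
    rw [show (0:Int) + ↑pre.length + 1 = ↑pre.length + 1 by ring,
      pv_hidx_shift rest (↑pre.length + 1)]
    simp only [List.map_cons, List.map_append, List.cons_append,
      List.nil_append, List.map_nil]
    congr 1
    norm_num
    exact ⟨fun a _ => by ring, by ring⟩
  obtain ⟨r', hr'⟩ : ∃ r', pvCube rest = -1 :: r' := ⟨_, rfl⟩
  rw [hc, hr', List.map_cons, pv_zip_pairs_cons,
    ← pv_zip_pairs_map (-1 :: r') (fun x => x + ((pre.length : Int) + 1)), List.map_cons]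
  norm_num

lemma pv_count_fold (c : List String) (s e : Int) (init : Int)
    (h0 : 0 ≤ s) (hse : s ≤ e) (he : e ≤ (c.length : Int)) :
    (PySem.List.pyRange s e 1).foldl
      (fun acc i => acc + (if PySem.List.pyGetD c i "" = "O" then 1 else 0)) init
    = init + ((c.drop s.toNat).take (e.toNat - s.toNat)).countP (· == "O") := by
  have hlen : e = ((c.take e.toNat).length : Int) := by simp; omega
  have hcg : (PySem.List.pyRange s e 1).foldl
      (fun acc i => acc + (if PySem.List.pyGetD c i "" = "O" then 1 else 0)) init
    = (PySem.List.pyRange s e 1).foldl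
      (fun acc i => acc + (if PySem.List.pyGetD (c.take e.toNat) i "" = "O" then 1 else 0)) init := by
    apply PySem.List.foldl_congr_mem
    intro acc i hi
    rw [PySem.List.mem_pyRange_one] at hi
    rw [PySem.List.pyGetD_of_nonneg c "" (by omega : (0:Int) ≤ i),
      PySem.List.pyGetD_of_nonneg _ "" (by omega : (0:Int) ≤ i)]
    congr 1
    simp [List.getD, show i.toNat < e.toNat by omega]
  rw [hcg]
  have hr : PySem.List.pyRange s e 1 = PySem.List.pyRange s ((c.take e.toNat).length : Int) 1 := by
    rw [← hlen]
  rw [hr]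
  rw [PySem.List.foldl_pyRange_pyGetD' (c.take e.toNat) ""
    (fun acc x => acc + (if x = "O" then 1 else 0)) init (by omega : (0:Int) ≤ s)]
  have hfun : (fun (acc : Int) (x : String) => acc + (if x = "O" then 1 else 0))
      = (fun (acc : Int) (x : String) => if (x == "O") = true then acc + 1 else acc) := by
    funext acc x; by_cases h : x = "O" <;> simp [h]
  rw [hfun, PySem.List.foldl_count_if]
  congr 1
  norm_cast
  rw [List.drop_take]

lemma pv_write_fold (c : List String) (v : String) (s e : Int)
    (h0 : 0 ≤ s) (hse : s ≤ e) (he : e ≤ (c.length : Int)) :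
    (PySem.List.pyRange s e 1).foldl (fun c i => PySem.List.pySetD c i v) c
    = c.take s.toNat ++ List.replicate (e.toNat - s.toNat) v ++ c.drop e.toNat := by
  obtain ⟨k, hk⟩ : ∃ k : Nat, e = s + k := ⟨(e - s).toNat, by omega⟩
  subst hk
  induction k with
  | zero =>
    rw [PySem.List.pyRange_one_eq_nil (by omega)]
    simp only [List.foldl_nil]
    have h1 : (s + ((0:Nat):Int)).toNat - s.toNat = 0 := by omega
    have h2 : (s + ((0:Nat):Int)).toNat = s.toNat := by omega
    rw [h1, h2]
    simp
  | succ n ih =>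
    have hsplit : s + ((n+1:Nat):Int) = (s + (n:Nat)) + 1 := by push_cast; ring
    rw [hsplit, PySem.List.pyRange_one_succ_right (by omega : s ≤ s + ((n:Nat):Int)),
      List.foldl_append]
    rw [ih (by omega) (by omega)]
    simp only [List.foldl_cons, List.foldl_nil]
    rw [PySem.List.pySetD_of_nonneg _ _ (by omega : (0:Int) ≤ s + (n:Nat))]
    have hlt : s.toNat + n < c.length := by omega
    have hlen1 : (c.take s.toNat).length = s.toNat := by simp; omega
    have hsn : (s + ((n:Nat):Int)).toNat = s.toNat + n := by omega
    have hsn1 : ((s + (n:Nat)) + 1).toNat = s.toNat + n + 1 := by omega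
    rw [hsn, hsn1]
    have hd := List.drop_eq_getElem_cons (l := c) hlt
    rw [List.set_append_right _ _ (by simp [hlen1])]
    have hidx : s.toNat + n - (List.take s.toNat c ++ List.replicate (s.toNat + n - s.toNat) v).length = 0 := by
      simp [hlen1]
    rw [hidx, hd, List.set_cons_zero]
    rw [show s.toNat + n - s.toNat = n from by omega, show s.toNat + n + 1 - s.toNat = n + 1 from by omega]
    simp [List.replicate_succ', List.append_assoc]

lemma pv_body_eq_iterStep (a b : Int) (c : List String)
    (ha : -1 ≤ a) (hab : a < b) (hb : b ≤ (c.length : Int)) :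
    pvBody a b c = pvIterStep (a + 1).toNat b.toNat c := by
  unfold pvBody pvIterStep
  dsimp only
  set s : Int := a + 1 with hs
  have h0 : 0 ≤ s := by omega
  have hse : s ≤ b := by omega
  rw [pv_count_fold c s b 0 h0 hse hb]
  set cnt : Nat := ((c.drop s.toNat).take (b.toNat - s.toNat)).countP (· == "O") with hcnt
  have hcntle : cnt ≤ b.toNat - s.toNat := by
    have := List.countP_le_length (l := (c.drop s.toNat).take (b.toNat - s.toNat)) (p := (· == "O"))
    have hlen : ((c.drop s.toNat).take (b.toNat - s.toNat)).length = b.toNat - s.toNat := by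
      simp; omega
    omega
  rw [zero_add]
  -- first write fold
  rw [pv_write_fold c "O" s (s + cnt) h0 (by omega) (by omega)]
  set c1 := c.take s.toNat ++ List.replicate ((s + (cnt:Int)).toNat - s.toNat) "O" ++ c.drop (s + (cnt:Int)).toNat with hc1
  have hlen1 : c1.length = c.length := by
    simp [hc1]; omega
  rw [pv_write_fold c1 "." (s + cnt) b (by omega) (by omega) (by rw [hlen1]; omega)]
  have hsc : (s + (cnt:Int)).toNat = s.toNat + cnt := by omega
  have htks : (c.take s.toNat).length = s.toNat := by simp; omega
  -- take (s+cnt) c1 = take s c ++ replicate cnt "O"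
  have htake : c1.take (s + (cnt:Int)).toNat = c.take s.toNat ++ List.replicate cnt "O" := by
    rw [hc1, hsc, show s.toNat + cnt - s.toNat = cnt from by omega, List.append_assoc,
      show s.toNat + cnt = (c.take s.toNat).length + cnt from by rw [htks],
      List.take_length_add_append,
      List.take_append_of_le_length (by simp), List.take_replicate]
    simp
  have hdrop : c1.drop b.toNat = c.drop b.toNat := by
    rw [hc1, hsc, List.append_assoc,
      show s.toNat + cnt - s.toNat = cnt from by omega,
      show b.toNat = (c.take s.toNat).length + (b.toNat - s.toNat) from by rw [htks]; omega,
      List.drop_length_add_append, List.drop_append]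
    simp only [List.length_replicate]
    rw [List.drop_replicate]
    simp only [show cnt - (b.toNat - s.toNat) = 0 from by omega, List.replicate_zero,
      List.nil_append, List.drop_drop, htks]
    congr 1
    omega
  rw [htake, hdrop]
  simp only [List.append_assoc]
  rw [hsc, show b.toNat - (s.toNat + cnt) = b.toNat - s.toNat - cnt from by omega]

lemma pv_cnt_le (s e : Nat) (c : List String) :
    ((c.drop s).take (e - s)).countP (· == "O") ≤ e - s := by
  have h1 : ((c.drop s).take (e - s)).countP (· == "O") ≤ ((c.drop s).take (e - s)).length :=
    List.countP_le_length
  have h2 : ((c.drop s).take (e - s)).length ≤ e - s := by simp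
  omega

lemma pv_length_iterStep (s e : Nat) (c : List String) (hse : s ≤ e) (he : e ≤ c.length) :
    (pvIterStep s e c).length = c.length := by
  unfold pvIterStep
  have := pv_cnt_le s e c
  simp
  omega

lemma pv_iterStep_shift (front t : List String) (s e : Nat) (hse : s ≤ e) :
    pvIterStep (front.length + s) (front.length + e) (front ++ t) = front ++ pvIterStep s e t := by
  unfold pvIterStep
  dsimp only
  rw [List.drop_length_add_append, List.take_length_add_append, List.drop_length_add_append]
  rw [show front.length + e - (front.length + s) = e - s from by omega]
  simp [List.append_assoc]

lemma pv_fold_pairs (cube : List Int) (a : Int) (c : List String) :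
    (PySem.List.pyRange 0 (((a :: cube).length : Int) - 1) 1).foldl
      (fun c idx => pvBody (PySem.List.pyGetD (a :: cube) idx 0)
        (PySem.List.pyGetD (a :: cube) (idx + 1) 0) c) c
    = (pvZipPairs (a :: cube)).foldl (fun c q => pvBody q.1 q.2 c) c := by
  induction cube generalizing a c with
  | nil => simp [pvZipPairs, PySem.List.pyRange_one_eq_nil]
  | cons b t ih =>
    have hlen : (((a :: b :: t).length : Int)) - 1 = ((t.length : Int) + 1) := by
      simp
    rw [hlen, PySem.List.pyRange_one_cons (by omega), List.foldl_cons]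
    have h01 : pvBody (PySem.List.pyGetD (a :: b :: t) 0 0)
        (PySem.List.pyGetD (a :: b :: t) (0 + 1) 0) c = pvBody a b c := by
      norm_num [PySem.List.pyGetD_ofNat']
    rw [h01]
    have hr1 := PySem.List.pyRange_one 1 ((t.length : Int) + 1)
    have hr0 := PySem.List.pyRange_one 0 ((t.length : Int))
    have hT : ((t.length : Int) + 1 - 1).toNat = t.length := by omega
    have hT0 : ((t.length : Int) - 0).toNat = t.length := by omega
    rw [show (0:Int) + 1 = 1 from by ring, hr1, hT, List.foldl_map]
    have step : ∀ (d : List String) (k : Nat),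
        pvBody (PySem.List.pyGetD (a :: b :: t) (1 + (k:Int)) 0)
          (PySem.List.pyGetD (a :: b :: t) (1 + (k:Int) + 1) 0) d
        = pvBody (PySem.List.pyGetD (b :: t) ((k:Int)) 0)
          (PySem.List.pyGetD (b :: t) ((k:Int) + 1) 0) d := by
      intro d k
      have e1 : (1 + (k:Int)) = ((k+1 : Nat) : Int) := by push_cast; ring
      have e2 : (1 + (k:Int) + 1) = ((k+2 : Nat) : Int) := by push_cast; ring
      rw [e2, e1, PySem.List.pyGetD_natCast, PySem.List.pyGetD_natCast]
      have e3 : ((k:Int) + 1) = ((k+1 : Nat) : Int) := by omega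
      rw [e3, PySem.List.pyGetD_natCast, PySem.List.pyGetD_natCast]
      simp [List.getD]
    have hfun : (fun (d : List String) (k : Nat) =>
        pvBody (PySem.List.pyGetD (a :: b :: t) (1 + (k:Int)) 0)
          (PySem.List.pyGetD (a :: b :: t) (1 + (k:Int) + 1) 0) d)
        = (fun (d : List String) (k : Nat) =>
        pvBody (PySem.List.pyGetD (b :: t) ((0 : Int) + (k:Int)) 0)
          (PySem.List.pyGetD (b :: t) ((0 : Int) + (k:Int) + 1) 0) d) := by
      funext d k
      rw [step d k]
      norm_num
    rw [hfun]
    rw [← List.foldl_map (f := fun (k : Nat) => (0:Int) + (k:Int))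
      (g := fun (d : List String) (i : Int) =>
        pvBody (PySem.List.pyGetD (b :: t) i 0) (PySem.List.pyGetD (b :: t) (i + 1) 0) d)]
    have hmapeq : (List.range t.length).map (fun (k : Nat) => (0:Int) + (k:Int))
        = (List.range ((t.length : Int) - 0).toNat).map (fun (k : Nat) => 0 + (k:Int)) := by
      rw [hT0]
    rw [hmapeq, ← hr0]
    have := ih b (pvBody a b c)
    simp only [List.length_cons] at this
    rw [show (((t.length + 1 : Nat) : Int) - 1) = (t.length : Int) from by push_cast; ring] at this
    rw [this]
    rfl

lemma pv_offset_fold (ps : List (Int × Int)) (front t : List String)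
    (hP : ∀ q ∈ ps, -1 ≤ q.1 ∧ q.1 < q.2 ∧ q.2 ≤ (t.length : Int)) :
    (ps.map (fun q => (q.1 + (front.length : Int), q.2 + (front.length : Int)))).foldl
        (fun c q => pvBody q.1 q.2 c) (front ++ t)
    = front ++ ps.foldl (fun c q => pvBody q.1 q.2 c) t := by
  induction ps generalizing t with
  | nil => simp
  | cons q ps ih =>
    obtain ⟨h1, h2, h3⟩ := hP q (List.mem_cons_self)
    simp only [List.map_cons, List.foldl_cons]
    have hb1 : pvBody (q.1 + (front.length : Int)) (q.2 + (front.length : Int)) (front ++ t)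
        = front ++ pvBody q.1 q.2 t := by
      rw [pv_body_eq_iterStep _ _ _ (by omega) (by omega)
        (by rw [List.length_append]; push_cast; omega)]
      rw [pv_body_eq_iterStep q.1 q.2 t h1 h2 h3]
      rw [show (q.1 + (front.length : Int) + 1).toNat = front.length + (q.1 + 1).toNat from by omega,
        show (q.2 + (front.length : Int)).toNat = front.length + q.2.toNat from by omega]
      exact pv_iterStep_shift front t _ _ (by omega)
    rw [hb1]
    apply ih
    intro r hr
    obtain ⟨g1, g2, g3⟩ := hP r (List.mem_cons_of_mem _ hr)
    refine ⟨g1, g2, ?_⟩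
    rw [pv_body_eq_iterStep q.1 q.2 t h1 h2 h3,
      pv_length_iterStep _ _ _ (by omega) (by omega)]
    exact g3

lemma pv_altGo_base (pre : List String) (r s : Int) (h : pre.all (· ≠ "#")) :
    pvAltGo pre r s = pvSegOut (r + (pre.countP (· == "O") : Int)) (s + (pre.length : Int)) := by
  induction pre generalizing r s with
  | nil => simp [pvAltGo]
  | cons x xs ih =>
    simp only [List.all_cons, Bool.and_eq_true, decide_eq_true_eq] at h
    rw [pvAltGo, if_neg h.1, ih _ _ h.2]
    congr 1
    · by_cases hx : x = "O" <;> simp [hx] <;> ring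
    · simp [List.length_cons]; ring

lemma pv_altGo_step (pre rest : List String) (r s : Int) (h : pre.all (· ≠ "#")) :
    pvAltGo (pre ++ "#" :: rest) r s
    = pvSegOut (r + (pre.countP (· == "O") : Int)) (s + (pre.length : Int)) ++ "#" :: pvAltGo rest 0 0 := by
  induction pre generalizing r s with
  | nil => simp [pvAltGo]
  | cons x xs ih =>
    simp only [List.all_cons, Bool.and_eq_true, decide_eq_true_eq] at h
    rw [List.cons_append, pvAltGo, if_neg h.1, ih _ _ h.2]
    congr 2
    · by_cases hx : x = "O" <;> simp [hx] <;> ring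
    · simp [List.length_cons]; ring

lemma pv_decomp (col : List String) (h : "#" ∈ col) :
    ∃ pre rest, col = pre ++ "#" :: rest ∧ pre.all (· ≠ "#") = true := by
  have hd : col.dropWhile (· ≠ "#") ≠ [] := by
    intro he
    have := List.takeWhile_append_dropWhile (p := (· ≠ "#")) (l := col)
    rw [he, List.append_nil] at this
    rw [← this] at h
    have h2 := List.all_takeWhile (p := (· ≠ "#")) (l := col)
    rw [List.all_eq_true] at h2
    have := h2 _ h
    simp at this
  refine ⟨col.takeWhile (· ≠ "#"), (col.dropWhile (· ≠ "#")).tail, ?_, List.all_takeWhile⟩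
  have hh0 := List.head_dropWhile_not (p := (· ≠ "#")) (l := col) hd
  have hh' : (col.dropWhile (· ≠ "#")).head hd = "#" := by
    have h2 : decide (((col.dropWhile (· ≠ "#")).head hd) ≠ "#") = false := hh0
    simpa using h2
  conv_lhs => rw [← List.takeWhile_append_dropWhile (p := (· ≠ "#")) (l := col)]
  congr 1
  conv_lhs => rw [← List.cons_head_tail hd]
  rw [hh']

lemma pv_shift_col_eq_pairs (col : List String) :
    shift_col col = (pvZipPairs (pvCube col)).foldl (fun c q => pvBody q.1 q.2 c) col :=
  pv_fold_pairs _ (-1) col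

lemma pv_all_ne_of_not_mem (col : List String) (h : "#" ∉ col) : col.all (· ≠ "#") = true := by
  rw [List.all_eq_true]
  intro x hx
  simp only [decide_eq_true_eq]
  intro e
  exact h (e ▸ hx)

theorem pv_pairsP (col : List String) :
    ∀ q ∈ pvZipPairs (pvCube col), -1 ≤ q.1 ∧ q.1 < q.2 ∧ q.2 ≤ (col.length : Int) := by
  by_cases hm : "#" ∈ col
  · obtain ⟨pre, rest, hcol, hpre⟩ := pv_decomp col hm
    have hlen : rest.length < col.length := by
      rw [hcol]; simp; omega
    rw [hcol, pv_pairs_step pre rest hpre]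
    intro q hq
    rcases List.mem_cons.mp hq with he | ht
    · subst he
      refine ⟨le_refl _, by omega, ?_⟩
      simp
      omega
    · obtain ⟨r, hr, hrq⟩ := List.mem_map.mp ht
      obtain ⟨g1, g2, g3⟩ := pv_pairsP rest r hr
      subst hrq
      refine ⟨by omega, by simpa using g2, ?_⟩
      simp
      omega
  · rw [pv_pairs_base col (pv_all_ne_of_not_mem col hm)]
    intro q hq
    simp only [List.mem_singleton] at hq
    subst hq
    refine ⟨le_refl _, by omega, le_refl _⟩
termination_by col.length
decreasing_by exact hlen

theorem pv_main (col : List String) : shift_col col = pvAltGo col 0 0 := by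
  rw [pv_shift_col_eq_pairs]
  by_cases hm : "#" ∈ col
  · obtain ⟨pre, rest, hcol, hpre⟩ := pv_decomp col hm
    have hlen : rest.length < col.length := by
      rw [hcol]; simp; omega
    rw [hcol, pv_pairs_step pre rest hpre, List.foldl_cons]
    set p : Nat := pre.length
    set cnt : Nat := pre.countP (· == "O") with hcntdef
    have hcntle : cnt ≤ p := by
      have := List.countP_le_length (p := (· == "O")) (l := pre)
      omega
    have hbody1 : pvBody (-1) (p : Int) (pre ++ "#" :: rest)
        = (List.replicate cnt "O" ++ List.replicate (p - cnt) "." ++ ["#"]) ++ rest := by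
      rw [pv_body_eq_iterStep _ _ _ (le_refl _) (by omega)
        (by simp; omega)]
      unfold pvIterStep
      dsimp only
      rw [show ((-1 : Int) + 1).toNat = 0 from rfl, show ((p : Nat) : Int).toNat = p from by omega]
      simp only [List.drop_zero, List.take_zero, Nat.sub_zero, List.nil_append]
      rw [List.take_left', List.drop_left']
      · simp [← hcntdef, List.append_assoc]
      · rfl
      · rfl
    rw [hbody1]
    have hfr : (List.replicate cnt "O" ++ List.replicate (p - cnt) "." ++ ["#"]).length
        = p + 1 := by simp; omega
    have hoff := pv_offset_fold (pvZipPairs (pvCube rest))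
      (List.replicate cnt "O" ++ List.replicate (p - cnt) "." ++ ["#"]) rest
      (pv_pairsP rest)
    rw [hfr] at hoff
    rw [show ((p : Nat) : Int) + 1 = ((p + 1 : Nat) : Int) from by push_cast; ring]
    rw [hoff, ← pv_shift_col_eq_pairs rest, pv_main rest, pv_altGo_step pre rest 0 0 hpre]
    unfold pvSegOut
    simp only [zero_add, Int.toNat_natCast, List.append_assoc, List.cons_append, List.nil_append]
    congr 3
    omega
  · have hpre := pv_all_ne_of_not_mem col hm
    rw [pv_pairs_base col hpre, List.foldl_cons, List.foldl_nil]
    have hbody : pvBody (-1) (col.length : Int) col = pvIterStep 0 col.length col := by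
      by_cases hnil : col = []
      · subst hnil
        rfl
      · rw [pv_body_eq_iterStep _ _ _ (le_refl _)
          (by have : 0 < col.length := List.length_pos_iff.mpr hnil; omega) (le_refl _)]
        norm_num
    rw [hbody, pv_altGo_base col 0 0 hpre]
    unfold pvIterStep pvSegOut
    dsimp only
    simp only [List.drop_zero, List.take_zero, Nat.sub_zero, List.nil_append]
    rw [List.take_of_length_le (le_refl _), List.drop_of_length_le (le_refl _)]
    simp only [List.append_nil, zero_add, Int.toNat_natCast]
    congr 1
    congr 1
    omega
termination_by col.length
decreasing_by all_goals exact hlen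

-- ===== VERDICT (by name: the statement is the Claim_ definition above) =====
theorem shift_col_spec : Claim_equal_shift_col := by
  intro col _
  unfold Spec_shift_col shift_col_alt
  exact pv_main col
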